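-- pv_equiv track=rewrite | github.com/asmit404/GFG_Solutions | Remove and Reverse.py | removeReverse
-- ===== SOURCE A (Python) =====
-- def removeReverse(s):
--     h, d = [0]*26, 1
--     for i in range(len(s)):
--         h[ord(s[i])-97] += 1
--     i = 0
--     while (0 <= i < len(s)):
--         if (h[ord(s[i])-97]) > 1:
--             h[ord(s[i])-97] -= 1
--             s = s[:i]+s[i+1:]
--             i = len(s)-1 if d == 1 else 0
--             d *= -1
--         else:
--             i += d
--     return s if d > 0 else s[::-1]
-- ===== SOURCE B (Python) =====
-- def removeReverse(s):
--     # O(n) two-pointer simulation: counts once; persistent pointers from both ends,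
--     # kept characters accumulated into front/back lists; direction flag instead of reversing.
--     h = [0] * 26
--     for ch in s:
--         h[ord(ch) - 97] += 1
--     l, r, d = 0, len(s) - 1, 1
--     front, back = [], []
--     while l <= r:
--         if d == 1:
--             c = ord(s[l]) - 97
--             if h[c] > 1:
--                 h[c] -= 1
--                 d = -1
--             else:
--                 front.append(s[l])
--             l += 1
--         else:
--             c = ord(s[r]) - 97
--             if h[c] > 1:
--                 h[c] -= 1
--                 d = 1
--             else:
--                 back.append(s[r])
--             r -= 1
--     if d == 1:
--         return ''.join(front) + ''.join(reversed(back))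
--     else:
--         return ''.join(back) + ''.join(reversed(front))
-- ===== Notes on version B (the rewrite author's own statement) =====
-- stated objective: faster
-- what changed: Replaces A's restart-from-the-end rescans with string re-slicing on every removal by a single O(n) two-pointer pass over the fixed string: counts are taken once, persistent left/right pointers skip already-singleton characters exactly once, kept characters are accumulated into front/back lists, and a direction flag replaces the physical reversals.
import Mathlib
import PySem

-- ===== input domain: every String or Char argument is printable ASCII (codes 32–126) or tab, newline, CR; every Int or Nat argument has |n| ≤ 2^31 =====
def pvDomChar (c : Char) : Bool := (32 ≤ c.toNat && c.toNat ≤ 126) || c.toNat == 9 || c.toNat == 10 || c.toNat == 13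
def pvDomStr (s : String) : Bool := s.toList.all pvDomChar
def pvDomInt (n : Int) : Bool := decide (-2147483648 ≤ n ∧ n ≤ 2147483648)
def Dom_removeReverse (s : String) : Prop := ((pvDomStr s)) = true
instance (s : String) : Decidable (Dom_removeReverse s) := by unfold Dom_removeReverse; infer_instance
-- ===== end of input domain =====

-- B is an O(n) two-pointer simulation of A's quadratic restart-and-reslice loop; equal return values on Pre_.

-- shared helpers: the count table h and its Python accesses h[ord(c)-97] (both Pythons build/use it identically)
def pvCnt (h : List Int) (c : Char) : Int := PySem.List.pyGetD h ((c.toNat : Int) - 97) 0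

def pvDec (h : List Int) (c : Char) : List Int :=
  PySem.List.pySetD h ((c.toNat : Int) - 97) (pvCnt h c - 1)

def pvCounts (l : List Char) : List Int :=
  l.foldl (fun h c => PySem.List.pySetD h ((c.toNat : Int) - 97) (pvCnt h c + 1)) (List.replicate 26 0)

-- ===== PORT A =====
-- termination helper for A's `s = s[:i]+s[i+1:]`
lemma pvRemLen {α : Type} (s : List α) (i : Int) (h0 : 0 ≤ i) (h1 : i < (s.length : Int)) :
    (PySem.List.slice s none (some i) ++ PySem.List.slice s (some (i + 1)) none).length
      = s.length - 1 := by
  rw [PySem.List.slice_to s h0, PySem.List.slice_from s (by omega)]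
  simp only [List.length_append, List.length_take, List.length_drop]
  omega

-- A's while loop: index i, direction d (Python's d = ±1 represented as a Bool, true = +1)
def loopA (s : List Char) (h : List Int) (i : Int) (d : Bool) : List Char :=
  if hin : 0 ≤ i ∧ i < (s.length : Int) then
    if 1 < pvCnt h (PySem.List.pyGetD s i 'a') then
      loopA (PySem.List.slice s none (some i) ++ PySem.List.slice s (some (i + 1)) none)
            (pvDec h (PySem.List.pyGetD s i 'a'))
            (if d then ((PySem.List.slice s none (some i) ++ PySem.List.slice s (some (i + 1)) none).length : Int) - 1 else 0)
            (!d)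
    else
      loopA s h (i + (if d then 1 else -1)) d
  else
    if d then s else s.reverse
termination_by s.length * (s.length + 2) + (if d then ((s.length : Int) - i).toNat else (i + 1).toNat)
decreasing_by
  · have hl := pvRemLen s i hin.1 hin.2
    obtain ⟨m, hm⟩ : ∃ m, s.length = m + 1 := ⟨s.length - 1, by omega⟩
    rcases Bool.dichotomy d with hd | hd <;> subst hd <;> simp [hl, hm] <;> nlinarith
  · rcases Bool.dichotomy d <;> rename_i hd <;> subst hd <;> simp <;> omega

def removeReverse (s : String) : String :=
  String.ofList (loopA s.toList (pvCounts s.toList) 0 true)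

-- ===== PORT B =====
-- B's while loop: persistent pointers l, r, direction d as Bool, kept chars in front/back
def loopB (s : List Char) (h : List Int) (l r : Int) (d : Bool)
    (front back : List Char) : List Char :=
  if l ≤ r then
    if d then
      if 1 < pvCnt h (PySem.List.pyGetD s l 'a') then
        loopB s (pvDec h (PySem.List.pyGetD s l 'a')) (l + 1) r false front back
      else
        loopB s h (l + 1) r true (front ++ [PySem.List.pyGetD s l 'a']) back
    else
      if 1 < pvCnt h (PySem.List.pyGetD s r 'a') then
        loopB s (pvDec h (PySem.List.pyGetD s r 'a')) l (r - 1) true front back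
      else
        loopB s h l (r - 1) false front (back ++ [PySem.List.pyGetD s r 'a'])
  else
    if d then front ++ back.reverse else back ++ front.reverse
termination_by (r + 1 - l).toNat
decreasing_by all_goals omega

def removeReverse_alt (s : String) : String :=
  String.ofList (loopB s.toList (pvCounts s.toList) 0 ((s.toList.length : Int) - 1) true [] [])

-- ===== PRECONDITION & SPEC =====
-- Pre_ excludes exactly the inputs on which Python A raises IndexError: a character with
-- code outside [71,122] makes ord(c)-97 fall outside [-26,25], an invalid index into h.
def Pre_removeReverse (s : String) : Prop :=
  (s.toList.all (fun c => 71 ≤ c.toNat && c.toNat ≤ 122)) = true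
instance (s : String) : Decidable (Pre_removeReverse s) := by unfold Pre_removeReverse; infer_instance
def pvWitness_removeReverse : String := "geeks"

def Spec_removeReverse (s : String) (out : String) : Prop := out = removeReverse_alt s
instance (s : String) (out : String) : Decidable (Spec_removeReverse s out) := by unfold Spec_removeReverse; infer_instance

-- ===== CLAIM (what is proved, stated in full; the proofs are below) =====
def Claim_equal_removeReverse : Prop :=
  ∀ (s : String), Dom_removeReverse s → Pre_removeReverse s → Spec_removeReverse s (removeReverse s)

-- ===== LEMMAS AND PROOFS =====

-- the common reference recursion: state (h, K1, M, K2) in current scan orientation;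
-- K1 = chars already kept behind the scan (most recent first), M = unscanned middle,
-- K2 = chars kept at the far end; a removal flips orientation.
def goRR (h : List Int) (K1 M K2 : List Char) : List Char :=
  match M with
  | [] => K1.reverse ++ K2
  | c :: M' =>
      if 1 < pvCnt h c then goRR (pvDec h c) K2 M'.reverse K1
      else goRR h (c :: K1) M' K2
termination_by M.length
decreasing_by all_goals simp

-- canonical Nat index of the (possibly Python-negatively-wrapped) h slot of c
def pvKey (c : Char) : Nat := (c.toNat - 71) % 26

def pvInR (K : List Char) : Prop := ∀ c ∈ K, 71 ≤ c.toNat ∧ c.toNat ≤ 122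

def pvOnes (h : List Int) (K : List Char) : Prop := ∀ c ∈ K, pvCnt h c ≤ 1

lemma pvKey_lt (c : Char) : pvKey c < 26 := Nat.mod_lt _ (by omega)

lemma pvCnt_eq (h : List Int) (hl : h.length = 26) (c : Char)
    (hc1 : 71 ≤ c.toNat) (hc2 : c.toNat ≤ 122) : pvCnt h c = h.getD (pvKey c) 0 := by
  unfold pvCnt pvKey
  by_cases h97 : 97 ≤ c.toNat
  · have : ((c.toNat : Int) - 97) = ((c.toNat - 97 : Nat) : Int) := by omega
    rw [this, PySem.List.pyGetD_natCast]
    congr 1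
    omega
  · have hk1 : 0 < 97 - c.toNat := by omega
    have hk2 : 97 - c.toNat ≤ h.length := by omega
    have : ((c.toNat : Int) - 97) = -((97 - c.toNat : Nat) : Int) := by omega
    rw [this, PySem.List.pyGetD_neg_natCast h _ 0 hk1 hk2,
        List.getD_eq_getElem h 0 (by omega)]
    congr 1
    omega

lemma pvDec_eq (h : List Int) (hl : h.length = 26) (c : Char)
    (hc1 : 71 ≤ c.toNat) (hc2 : c.toNat ≤ 122) :
    pvDec h c = h.set (pvKey c) (pvCnt h c - 1) := by
  unfold pvDec pvKey
  by_cases h97 : 97 ≤ c.toNat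
  · have : ((c.toNat : Int) - 97) = ((c.toNat - 97 : Nat) : Int) := by omega
    rw [this, PySem.List.pySetD_natCast]
    congr 1
    omega
  · -- negative index: unfold pySetD/pySet?/pyIdx?
    simp only [PySem.List.pySetD, PySem.List.pySet?, PySem.List.pyIdx?]
    have hneg : ¬ (0 ≤ (c.toNat : Int) - 97) := by omega
    rw [if_neg hneg, if_pos (by omega : -(h.length : Int) ≤ (c.toNat : Int) - 97)]
    simp only [Option.map_some, Option.getD_some]
    congr 1
    omega

lemma pvDec_length (h : List Int) (c : Char) : (pvDec h c).length = h.length :=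
  PySem.List.length_pySetD h _ _

lemma pvCnt_pvDec (h : List Int) (hl : h.length = 26) (c c' : Char)
    (hc : 71 ≤ c.toNat ∧ c.toNat ≤ 122) (hc' : 71 ≤ c'.toNat ∧ c'.toNat ≤ 122) :
    pvCnt (pvDec h c') c = if pvKey c = pvKey c' then pvCnt h c' - 1 else pvCnt h c := by
  rw [pvCnt_eq _ (by rw [pvDec_length]; exact hl) c hc.1 hc.2,
      pvDec_eq h hl c' hc'.1 hc'.2]
  by_cases hk : pvKey c = pvKey c'
  · rw [if_pos hk, hk, List.getD_eq_getElem _ 0 (by simp [hl]; exact pvKey_lt c'),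
        List.getElem_set_self]
  · rw [if_neg hk, pvCnt_eq h hl c hc.1 hc.2,
      List.getD_eq_getElem _ 0 (by simp [hl]; exact pvKey_lt c),
      List.getD_eq_getElem _ 0 (by rw [hl]; exact pvKey_lt c)]
    rw [List.getElem_set]
    rw [if_neg (by omega)]

lemma pvCnt_key_eq (h : List Int) (hl : h.length = 26) (c c' : Char)
    (hc : 71 ≤ c.toNat ∧ c.toNat ≤ 122) (hc' : 71 ≤ c'.toNat ∧ c'.toNat ≤ 122)
    (hk : pvKey c = pvKey c') : pvCnt h c = pvCnt h c' := by
  rw [pvCnt_eq h hl c hc.1 hc.2, pvCnt_eq h hl c' hc'.1 hc'.2, hk]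

lemma pvOnes_pvDec (h : List Int) (hl : h.length = 26) (c' : Char) (K : List Char)
    (hc' : 71 ≤ c'.toNat ∧ c'.toNat ≤ 122) (hK : pvInR K)
    (hgt : 1 < pvCnt h c') (hones : pvOnes h K) : pvOnes (pvDec h c') K := by
  intro c hcK
  rw [pvCnt_pvDec h hl c c' (hK c hcK) hc']
  by_cases hk : pvKey c = pvKey c'
  · exfalso
    have := pvCnt_key_eq h hl c c' (hK c hcK) hc' hk
    have := hones c hcK
    omega
  · rw [if_neg hk]; exact hones c hcK

lemma pvCounts_length (l : List Char) : (pvCounts l).length = 26 := by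
  unfold pvCounts
  have : ∀ (l : List Char) (h : List Int),
      (l.foldl (fun h c => PySem.List.pySetD h ((c.toNat : Int) - 97) (pvCnt h c + 1)) h).length
        = h.length := by
    intro l
    induction l with
    | nil => intro h; rfl
    | cons c l ih => intro h; rw [List.foldl_cons, ih, PySem.List.length_pySetD]
  rw [this]; simp

-- s[i] at the head of the middle
lemma pvGet_mid (pre : List Char) (c : Char) (rest : List Char) :
    PySem.List.pyGetD (pre ++ c :: rest) ((pre.length : Int)) 'a' = c := by
  rw [PySem.List.pyGetD_natCast]
  rw [List.getD_eq_getElem _ _ (by simp)]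
  simp

-- A's `s[:i] + s[i+1:]` at i = |pre| deletes the head of the middle
lemma pvRem_mid (pre : List Char) (c : Char) (rest : List Char) :
    PySem.List.slice (pre ++ c :: rest) none (some (pre.length : Int)) ++
      PySem.List.slice (pre ++ c :: rest) (some ((pre.length : Int) + 1)) none
      = pre ++ rest := by
  rw [PySem.List.slice_to _ (by omega), PySem.List.slice_from _ (by omega)]
  have h1 : ((pre.length : Int)).toNat = pre.length := by omega
  have h2 : ((pre.length : Int) + 1).toNat = (pre ++ [c]).length := by simp
  rw [h1, h2, List.take_left]
  have : pre ++ c :: rest = (pre ++ [c]) ++ rest := by simp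
  rw [this, List.drop_left]

-- forward skipping: count-1 chars are passed over one by one
lemma pvSkipF : ∀ (ks pre rest : List Char) (h : List Int), pvOnes h ks →
    loopA (pre ++ ks ++ rest) h (pre.length : Int) true
      = loopA (pre ++ ks ++ rest) h ((pre.length : Int) + ks.length) true := by
  intro ks
  induction ks with
  | nil => intro pre rest h _; simp
  | cons k ks ih =>
    intro pre rest h hones
    have hs : pre ++ (k :: ks) ++ rest = pre ++ k :: (ks ++ rest) := by simp
    rw [hs]
    conv_lhs => rw [loopA]
    rw [dif_pos ⟨by omega, by simp only [List.length_append, List.length_cons]; omega⟩, pvGet_mid]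
    rw [if_neg (by have := hones k (by simp); omega)]
    have hs2 : pre ++ k :: (ks ++ rest) = (pre ++ [k]) ++ ks ++ rest := by simp
    rw [hs2]
    have hi : ((pre.length : Int) + (if true then (1:Int) else -1)) = (((pre ++ [k]).length : Int)) := by
      simp
    rw [hi, ih (pre ++ [k]) rest h (fun c hc => hones c (by simp [hc]))]
    congr 1
    simp
    ring

-- backward skipping
lemma pvSkipB : ∀ (ks pre rest : List Char) (h : List Int), pvOnes h ks →
    loopA (pre ++ ks ++ rest) h ((pre.length : Int) + ks.length - 1) false
      = loopA (pre ++ ks ++ rest) h ((pre.length : Int) - 1) false := by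
  intro ks
  induction ks using List.reverseRecOn with
  | nil => intro pre rest h _; simp
  | append_singleton ks k ih =>
    intro pre rest h hones
    have hs : pre ++ (ks ++ [k]) ++ rest = (pre ++ ks) ++ k :: rest := by simp
    have hi : ((pre.length : Int) + ((ks ++ [k]).length : Int) - 1) = (((pre ++ ks).length : Int)) := by
      simp; ring
    rw [hs, hi]
    conv_lhs => rw [loopA]
    have hgm : PySem.List.pyGetD ((pre ++ ks) ++ k :: rest) (((pre ++ ks).length : Int)) 'a' = k :=
      pvGet_mid (pre ++ ks) k rest
    rw [dif_pos ⟨by omega, by simp only [List.length_append, List.length_cons]; omega⟩, hgm]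
    rw [if_neg (by have := hones k (by simp); omega)]
    have hs2 : (pre ++ ks) ++ k :: rest = pre ++ ks ++ (k :: rest) := by simp
    have hi2 : (((pre ++ ks).length : Int) + (if false then (1:Int) else -1))
        = ((pre.length : Int) + (ks.length : Int) - 1) := by simp; ring
    rw [hs2, hi2, ih pre (k :: rest) h (fun c hc => hones c (by simp [hc]))]

-- A's loop on an exhausted middle: skip the far kept block and stop
lemma pvLoopA_go_nil (h : List Int) (K1 K2 : List Char) (hones2 : pvOnes h K2) :
    (loopA (K1.reverse ++ [] ++ K2) h (K1.length : Int) true = goRR h K1 [] K2 ∧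
     loopA (K2.reverse ++ [].reverse ++ K1) h ((K2.length : Int) + ([] : List Char).length - 1) false
       = goRR h K1 [] K2) := by
  constructor
  · have hs : K1.reverse ++ [] ++ K2 = K1.reverse ++ K2 ++ [] := by simp
    have hidx : ((K1.length : Int)) = ((K1.reverse.length : Int)) := by simp
    rw [hs, hidx, pvSkipF K2 K1.reverse [] h hones2]
    rw [loopA]
    rw [dif_neg (by simp only [List.length_append, List.length_reverse, List.length_nil]; omega)]
    rw [goRR]
    simp
  · have hs : K2.reverse ++ [].reverse ++ K1 = ([] : List Char) ++ K2.reverse ++ K1 := by simp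
    have hidx : ((K2.length : Int) + (([] : List Char).length : Int) - 1)
        = (((([] : List Char)).length : Int) + (K2.reverse.length : Int) - 1) := by simp
    rw [hs, hidx, pvSkipB K2.reverse [] K1 h (fun c hc => hones2 c (by simpa using hc))]
    rw [loopA]
    rw [dif_neg (by simp only [List.length_nil]; omega)]
    rw [goRR]
    simp

-- A's loop equals the reference recursion (both orientations, strong induction on |M|)
lemma pvLoopA_go : ∀ (n : Nat) (M : List Char), M.length ≤ n →
    ∀ (h : List Int) (K1 K2 : List Char), h.length = 26 →
    pvInR K1 → pvInR M → pvInR K2 → pvOnes h K1 → pvOnes h K2 →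
    (loopA (K1.reverse ++ M ++ K2) h (K1.length : Int) true = goRR h K1 M K2 ∧
     loopA (K2.reverse ++ M.reverse ++ K1) h ((K2.length : Int) + M.length - 1) false
       = goRR h K1 M K2) := by
  intro n
  induction n with
  | zero =>
    intro M hM h K1 K2 _ _ _ _ _ o2
    have : M = [] := List.eq_nil_of_length_eq_zero (by omega)
    subst this
    exact pvLoopA_go_nil h K1 K2 o2
  | succ n ih =>
    intro M hM h K1 K2 hl i1 iM i2 o1 o2
    match M with
    | [] => exact pvLoopA_go_nil h K1 K2 o2
    | c :: M' =>
      have hc : 71 ≤ c.toNat ∧ c.toNat ≤ 122 := iM c (by simp)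
      have iM' : pvInR M' := fun x hx => iM x (by simp [hx])
      have hM' : M'.length ≤ n := by simp at hM; omega
      constructor
      · -- forward orientation, scanning head c
        have hs : K1.reverse ++ (c :: M') ++ K2 = K1.reverse ++ c :: (M' ++ K2) := by simp
        have hidx : ((K1.length : Int)) = ((K1.reverse.length : Int)) := by simp
        rw [hs, hidx]
        conv_lhs => rw [loopA]
        rw [dif_pos ⟨by omega,
          by simp only [List.length_append, List.length_cons, List.length_reverse]; omega⟩]
        rw [pvGet_mid K1.reverse c (M' ++ K2)]
        by_cases hgt : 1 < pvCnt h c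
        · rw [if_pos hgt, pvRem_mid K1.reverse c (M' ++ K2)]
          simp only [Bool.not_true, if_true]
          have hs2 : K1.reverse ++ (M' ++ K2) = (K1.reverse ++ M') ++ K2 ++ [] := by simp
          have hidx2 : (((K1.reverse ++ (M' ++ K2)).length : Int)) - 1
              = (((K1.reverse ++ M').length : Int)) + ((K2.length : Int)) - 1 := by
            simp; ring
          rw [hidx2, hs2,
            pvSkipB K2 (K1.reverse ++ M') [] (pvDec h c)
              (pvOnes_pvDec h hl c K2 hc i2 hgt o2)]
          have hs3 : (K1.reverse ++ M') ++ K2 ++ [] = K1.reverse ++ M'.reverse.reverse ++ K2 := by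
            simp
          have hidx3 : (((K1.reverse ++ M').length : Int)) - 1
              = ((K1.length : Int) + (M'.reverse.length : Int) - 1) := by simp
          rw [hs3, hidx3]
          have h2 := (ih M'.reverse (by simpa using hM') (pvDec h c) K2 K1
            (by rw [pvDec_length]; exact hl) i2
            (fun x hx => iM' x (by simpa using hx)) i1
            (pvOnes_pvDec h hl c K2 hc i2 hgt o2)
            (pvOnes_pvDec h hl c K1 hc i1 hgt o1)).2
          rw [h2]
          conv_rhs => rw [goRR]
          rw [if_pos hgt]
        · rw [if_neg hgt]
          have hs2 : K1.reverse ++ c :: (M' ++ K2) = (c :: K1).reverse ++ M' ++ K2 := by simp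
          have hidx2 : ((K1.reverse.length : Int) + (if true then (1 : Int) else -1))
              = (((c :: K1).length : Int)) := by simp
          rw [hs2, hidx2]
          have h1 := (ih M' hM' h (c :: K1) K2 hl
            (fun x hx => by rcases List.mem_cons.mp hx with hx | hx
                            · subst hx; exact hc
                            · exact i1 x hx)
            iM' i2
            (fun x hx => by rcases List.mem_cons.mp hx with hx | hx
                            · subst hx; omega
                            · exact o1 x hx)
            o2).1
          rw [h1]
          conv_rhs => rw [goRR]
          rw [if_neg hgt]
      · -- backward orientation, scanning head c from the far end
        have hs : K2.reverse ++ (c :: M').reverse ++ K1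
            = (K2.reverse ++ M'.reverse) ++ c :: K1 := by simp
        have hidx : ((K2.length : Int) + ((c :: M').length : Int) - 1)
            = (((K2.reverse ++ M'.reverse).length : Int)) := by simp; ring
        rw [hs, hidx]
        conv_lhs => rw [loopA]
        rw [dif_pos ⟨by omega,
          by simp only [List.length_append, List.length_cons, List.length_reverse]; omega⟩]
        rw [pvGet_mid (K2.reverse ++ M'.reverse) c K1]
        by_cases hgt : 1 < pvCnt h c
        · rw [if_pos hgt, pvRem_mid (K2.reverse ++ M'.reverse) c K1]
          simp only [Bool.not_false, Bool.false_eq_true, if_false]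
          have hidx2 : ((0 : Int)) = ((([] : List Char).length : Int)) := by simp
          have hs2 : (K2.reverse ++ M'.reverse) ++ K1
              = ([] : List Char) ++ K2.reverse ++ (M'.reverse ++ K1) := by simp
          rw [hidx2, hs2,
            pvSkipF K2.reverse ([] : List Char) (M'.reverse ++ K1) (pvDec h c)
              (fun x hx => pvOnes_pvDec h hl c K2 hc i2 hgt o2 x (by simpa using hx))]
          have hs3 : ([] : List Char) ++ K2.reverse ++ (M'.reverse ++ K1)
              = K2.reverse ++ M'.reverse ++ K1 := by simp
          have hidx3 : (((([] : List Char).length : Int)) + (K2.reverse.length : Int))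
              = ((K2.length : Int)) := by simp
          rw [hs3, hidx3]
          have h1 := (ih M'.reverse (by simpa using hM') (pvDec h c) K2 K1
            (by rw [pvDec_length]; exact hl) i2
            (fun x hx => iM' x (by simpa using hx)) i1
            (pvOnes_pvDec h hl c K2 hc i2 hgt o2)
            (pvOnes_pvDec h hl c K1 hc i1 hgt o1)).1
          rw [h1]
          conv_rhs => rw [goRR]
          rw [if_pos hgt]
        · rw [if_neg hgt]
          have hs2 : (K2.reverse ++ M'.reverse) ++ c :: K1
              = K2.reverse ++ M'.reverse ++ (c :: K1) := by simp
          have hidx2 : ((((K2.reverse ++ M'.reverse).length : Int)) + (if false then (1 : Int) else -1))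
              = ((K2.length : Int) + (M'.length : Int) - 1) := by simp; ring
          rw [hs2, hidx2]
          have h2 := (ih M' hM' h (c :: K1) K2 hl
            (fun x hx => by rcases List.mem_cons.mp hx with hx | hx
                            · subst hx; exact hc
                            · exact i1 x hx)
            iM' i2
            (fun x hx => by rcases List.mem_cons.mp hx with hx | hx
                            · subst hx; omega
                            · exact o1 x hx)
            o2).2
          rw [h2]
          conv_rhs => rw [goRR]
          rw [if_neg hgt]

-- B's loop on an exhausted middle: the pointers have crossed
lemma pvLoopB_go_nil (h : List Int) (pre suf front back : List Char) :
    (loopB (pre ++ [] ++ suf) h (pre.length : Int) ((pre.length : Int) + ([] : List Char).length - 1) true front back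
        = goRR h front.reverse [] back.reverse ∧
     loopB (pre ++ [].reverse ++ suf) h (pre.length : Int) ((pre.length : Int) + ([] : List Char).length - 1) false front back
        = goRR h back.reverse [] front.reverse) := by
  constructor <;>
    (rw [loopB, if_neg (by simp only [List.length_nil]; omega), goRR]; simp)

-- B's loop equals the reference recursion
lemma pvLoopB_go : ∀ (n : Nat) (M : List Char), M.length ≤ n →
    ∀ (h : List Int) (pre suf front back : List Char),
    (loopB (pre ++ M ++ suf) h (pre.length : Int) ((pre.length : Int) + M.length - 1) true front back
        = goRR h front.reverse M back.reverse ∧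
     loopB (pre ++ M.reverse ++ suf) h (pre.length : Int) ((pre.length : Int) + M.length - 1) false front back
        = goRR h back.reverse M front.reverse) := by
  intro n
  induction n with
  | zero =>
    intro M hM h pre suf front back
    have : M = [] := List.eq_nil_of_length_eq_zero (by omega)
    subst this
    exact pvLoopB_go_nil h pre suf front back
  | succ n ih =>
    intro M hM h pre suf front back
    match M with
    | [] => exact pvLoopB_go_nil h pre suf front back
    | c :: M' =>
      have hM' : M'.length ≤ n := by simp at hM; omega
      constructor
      · -- d = true: B reads s[l] with l = |pre|
        have hs : pre ++ (c :: M') ++ suf = pre ++ c :: (M' ++ suf) := by simp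
        rw [hs]
        conv_lhs => rw [loopB]
        rw [if_pos (by simp only [List.length_cons]; omega)]
        simp only [if_true]
        rw [pvGet_mid pre c (M' ++ suf)]
        by_cases hgt : 1 < pvCnt h c
        · rw [if_pos hgt]
          have hs2 : pre ++ c :: (M' ++ suf) = (pre ++ [c]) ++ M'.reverse.reverse ++ suf := by simp
          have hl2 : ((pre.length : Int) + 1) = (((pre ++ [c]).length : Int)) := by simp
          have hr2 : ((pre.length : Int) + ((c :: M').length : Int) - 1)
              = (((pre ++ [c]).length : Int) + ((M'.reverse.length : Int)) - 1) := by simp; ring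
          rw [hs2, hl2, hr2,
            (ih M'.reverse (by simpa using hM') (pvDec h c) (pre ++ [c]) suf front back).2]
          conv_rhs => rw [goRR]
          rw [if_pos hgt]
        · rw [if_neg hgt]
          have hs2 : pre ++ c :: (M' ++ suf) = (pre ++ [c]) ++ M' ++ suf := by simp
          have hl2 : ((pre.length : Int) + 1) = (((pre ++ [c]).length : Int)) := by simp
          have hr2 : ((pre.length : Int) + ((c :: M').length : Int) - 1)
              = (((pre ++ [c]).length : Int) + ((M'.length : Int)) - 1) := by simp; ring
          rw [hs2, hl2, hr2,
            (ih M' hM' h (pre ++ [c]) suf (front ++ [c]) back).1]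
          conv_rhs => rw [goRR]
          rw [if_neg hgt]
          simp
      · -- d = false: B reads s[r] with r = |pre| + |M| - 1
        have hs : pre ++ (c :: M').reverse ++ suf = (pre ++ M'.reverse) ++ c :: suf := by simp
        have hr : ((pre.length : Int) + ((c :: M').length : Int) - 1)
            = (((pre ++ M'.reverse).length : Int)) := by simp; ring
        rw [hs, hr]
        conv_lhs => rw [loopB]
        rw [if_pos (by simp only [List.length_append, List.length_reverse]; omega)]
        simp only [Bool.false_eq_true, if_false]
        rw [pvGet_mid (pre ++ M'.reverse) c suf]
        by_cases hgt : 1 < pvCnt h c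
        · rw [if_pos hgt]
          have hs2 : (pre ++ M'.reverse) ++ c :: suf = pre ++ M'.reverse ++ (c :: suf) := by simp
          have hr2 : (((pre ++ M'.reverse).length : Int) - 1)
              = ((pre.length : Int) + ((M'.reverse.length : Int)) - 1) := by simp
          rw [hs2, hr2]
          have hb := (ih M'.reverse (by simpa using hM') (pvDec h c) pre (c :: suf) front back).1
          rw [hb]
          conv_rhs => rw [goRR]
          rw [if_pos hgt]
        · rw [if_neg hgt]
          have hs2 : (pre ++ M'.reverse) ++ c :: suf = pre ++ M'.reverse ++ (c :: suf) := by simp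
          have hr2 : (((pre ++ M'.reverse).length : Int) - 1)
              = ((pre.length : Int) + ((M'.length : Int)) - 1) := by simp
          rw [hs2, hr2,
            (ih M' hM' h pre (c :: suf) front (back ++ [c])).2]
          conv_rhs => rw [goRR]
          rw [if_neg hgt]
          simp

-- ===== VERDICT (by name: the statement is the Claim_ definition above) =====
theorem removeReverse_spec : Claim_equal_removeReverse := by
  intro s _ hpre
  unfold Spec_removeReverse removeReverse removeReverse_alt
  congr 1
  have hin : pvInR s.toList := by
    intro c hc
    have := List.all_eq_true.mp hpre c hc
    simpa using this
  have hA := (pvLoopA_go s.toList.length s.toList le_rfl (pvCounts s.toList) [] []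
      (pvCounts_length _) (by intro c hc; cases hc) hin (by intro c hc; cases hc)
      (by intro c hc; cases hc) (by intro c hc; cases hc)).1
  have hB := (pvLoopB_go s.toList.length s.toList le_rfl (pvCounts s.toList) [] [] [] []).1
  simpa using hA.trans (by simpa using hB.symm)
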